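-- pv_equiv track=rewrite | github.com/Rubanzer/business-brain | src/business_brain/discovery/market_basket.py | _build_baskets
-- ===== SOURCE A (Python) =====
-- from collections import Counter, defaultdict
--
-- def _build_baskets(
--     rows: list[dict],
--     transaction_column: str,
--     product_column: str,
-- ) -> dict[str, set[str]] | None:
--     """Group products by transaction, returning {txn_id: {products}} or None."""
--     baskets: dict[str, set[str]] = defaultdict(set)
--     for row in rows:
--         txn = row.get(transaction_column)
--         product = row.get(product_column)
--         if txn is None or product is None:
--             continue
--         baskets[str(txn)].add(str(product))
--
--     if not baskets:
--         return None
--     return dict(baskets)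
-- ===== SOURCE B (Python) =====
-- def _build_baskets(
--     rows: list[dict],
--     transaction_column: str,
--     product_column: str,
-- ) -> dict[str, set[str]] | None:
--     """Group products by transaction via a filtered pair list and a grouping comprehension."""
--     pairs = [
--         (str(row.get(transaction_column)), str(row.get(product_column)))
--         for row in rows
--         if row.get(transaction_column) is not None
--         and row.get(product_column) is not None
--     ]
--     if not pairs:
--         return None
--     keys = list(dict.fromkeys(t for t, _ in pairs))
--     return {t: {p for u, p in pairs if u == t} for t in keys}
-- ===== Notes on version B (the rewrite author's own statement) =====
-- stated objective: alternative
-- what changed: Replaces A's incremental defaultdict-of-sets accumulation with a two-phase decomposition: a filtered (txn, product) pair list, an ordered dedup of transaction keys, and a grouping set-comprehension per key.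
import Mathlib
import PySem

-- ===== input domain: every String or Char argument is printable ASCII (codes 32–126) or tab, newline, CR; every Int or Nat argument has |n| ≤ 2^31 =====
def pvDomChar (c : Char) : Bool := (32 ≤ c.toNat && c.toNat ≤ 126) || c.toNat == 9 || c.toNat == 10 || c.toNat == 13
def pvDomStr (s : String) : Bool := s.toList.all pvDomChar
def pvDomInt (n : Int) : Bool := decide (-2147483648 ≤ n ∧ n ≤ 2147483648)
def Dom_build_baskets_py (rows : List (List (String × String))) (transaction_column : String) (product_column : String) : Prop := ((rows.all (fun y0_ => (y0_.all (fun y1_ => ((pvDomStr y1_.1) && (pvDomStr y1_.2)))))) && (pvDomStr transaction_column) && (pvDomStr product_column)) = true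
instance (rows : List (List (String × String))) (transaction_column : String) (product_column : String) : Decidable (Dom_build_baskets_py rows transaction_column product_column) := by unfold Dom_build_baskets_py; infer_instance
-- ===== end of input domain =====

-- B replaces A's incremental defaultdict-of-sets accumulation by a filter-to-pairs pass, an
-- ordered key dedup and a grouping comprehension (objective: alternative decomposition, same cost).

-- ===== PORT A =====
def build_baskets_py (rows : List (List (String × String))) (transaction_column : String) (product_column : String) : Option (List (String × List String)) :=
  -- baskets = defaultdict(set); for row in rows: …; baskets[str(txn)].add(str(product))
  let baskets : PySem.Dict String (PySem.Set String) :=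
    rows.foldl (fun d row =>
      match (PySem.Dict.mk row).get? transaction_column, (PySem.Dict.mk row).get? product_column with
      | some txn, some product => d.insert txn (PySem.Set.add (d.getD txn PySem.Set.empty) product)
      | _, _ => d) PySem.Dict.empty
  if baskets.size = 0 then none else some baskets.items

-- ===== PORT B =====
def build_baskets_py_alt (rows : List (List (String × String))) (transaction_column : String) (product_column : String) : Option (List (String × List String)) :=
  let pairs : List (String × String) :=
    rows.filterMap (fun row =>
      ((PySem.Dict.mk row).get? transaction_column).bind (fun txn =>
        ((PySem.Dict.mk row).get? product_column).map (fun product => (txn, product))))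
  if pairs = [] then none
  else some ((PySem.List.dedup (pairs.map Prod.fst)).map (fun t =>
    (t, PySem.Set.ofList (pairs.filterMap (fun q => if q.1 = t then some q.2 else none)))))

-- ===== PRECONDITION & SPEC =====
def Spec_build_baskets_py (rows : List (List (String × String))) (transaction_column : String) (product_column : String) (out : Option (List (String × List String))) : Prop := out = build_baskets_py_alt rows transaction_column product_column
instance (rows : List (List (String × String))) (transaction_column : String) (product_column : String) (out : Option (List (String × List String))) : Decidable (Spec_build_baskets_py rows transaction_column product_column out) := by unfold Spec_build_baskets_py; infer_instance

-- ===== CLAIM (what is proved, stated in full; the proofs are below) =====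
def Claim_equal_build_baskets_py : Prop := ∀ (rows : List (List (String × String))) (transaction_column : String) (product_column : String), Dom_build_baskets_py rows transaction_column product_column → Spec_build_baskets_py rows transaction_column product_column (build_baskets_py rows transaction_column product_column)

-- ===== LEMMAS AND PROOFS =====

-- the A-side step, over an already-extracted (txn, product) pair
def stepA (d : PySem.Dict String (PySem.Set String)) (q : String × String) : PySem.Dict String (PySem.Set String) :=
  d.insert q.1 (PySem.Set.add (d.getD q.1 PySem.Set.empty) q.2)

-- A's loop over rows = stepA folded over the extracted pair list
theorem foldA_eq_fold_pairs (rows : List (List (String × String))) (tc pc : String)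
    (d : PySem.Dict String (PySem.Set String)) :
    rows.foldl (fun d row =>
      match (PySem.Dict.mk row).get? tc, (PySem.Dict.mk row).get? pc with
      | some txn, some product => d.insert txn (PySem.Set.add (d.getD txn PySem.Set.empty) product)
      | _, _ => d) d
    = (rows.filterMap (fun row =>
        ((PySem.Dict.mk row).get? tc).bind (fun txn =>
          ((PySem.Dict.mk row).get? pc).map (fun product => (txn, product))))).foldl stepA d := by
  induction rows generalizing d with
  | nil => rfl
  | cons row rest ih =>
    simp only [List.foldl_cons, List.filterMap_cons]
    cases (PySem.Dict.mk row).get? tc <;> cases (PySem.Dict.mk row).get? pc <;> exact ih _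

-- the basket of t after the fold: d's basket updated by t's products, in order
theorem getD_fold_stepA (pairs : List (String × String)) (d : PySem.Dict String (PySem.Set String)) (t : String) :
    (pairs.foldl stepA d).getD t PySem.Set.empty
    = PySem.Set.update (d.getD t PySem.Set.empty)
        (pairs.filterMap (fun q => if q.1 = t then some q.2 else none)) := by
  induction pairs generalizing d with
  | nil => rfl
  | cons q rest ih =>
    simp only [List.foldl_cons, List.filterMap_cons, ih]
    by_cases h : q.1 = t
    · simp [h, stepA, PySem.Set.update]
    · have h' : t ≠ q.1 := fun e => h e.symm
      simp [stepA, PySem.Dict.getD_insert, h, h']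

theorem keys_fold_stepA (pairs : List (String × String)) :
    (pairs.foldl stepA PySem.Dict.empty).keys = PySem.List.dedup (pairs.map Prod.fst) := by
  have h := PySem.Dict.keys_foldl_insert_key (l := pairs) (key := Prod.fst)
    (f := fun d q => PySem.Set.add (d.getD q.1 PySem.Set.empty) q.2)
    (d := (PySem.Dict.empty : PySem.Dict String (PySem.Set String)))
  simpa [stepA, PySem.Dict.keys_empty, PySem.Set.update, PySem.Set.ofList_eq_foldl] using h

theorem nodup_keys_fold_stepA (pairs : List (String × String)) :
    (pairs.foldl stepA PySem.Dict.empty).keys.Nodup := by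
  rw [keys_fold_stepA]; exact PySem.List.nodup_dedup _

-- the fold's items are exactly B's grouped list
theorem items_fold_stepA (pairs : List (String × String)) :
    (pairs.foldl stepA PySem.Dict.empty).items
    = (PySem.List.dedup (pairs.map Prod.fst)).map (fun t =>
        (t, PySem.Set.ofList (pairs.filterMap (fun q => if q.1 = t then some q.2 else none)))) := by
  rw [PySem.Dict.items_eq_map_keys _ (nodup_keys_fold_stepA pairs) PySem.Set.empty,
    keys_fold_stepA]
  apply List.map_congr_left
  intro t _
  rw [getD_fold_stepA]
  simp [PySem.Dict.getD_empty, PySem.Set.update, PySem.Set.ofList_eq_foldl]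

-- both emptiness tests and both result lists coincide, over the shared pair list
theorem main_fold_stepA (pairs : List (String × String)) :
    (if (pairs.foldl stepA PySem.Dict.empty).size = 0 then none
     else some (pairs.foldl stepA PySem.Dict.empty).items)
    = (if pairs = [] then none
       else some ((PySem.List.dedup (pairs.map Prod.fst)).map (fun t =>
         (t, PySem.Set.ofList (pairs.filterMap (fun q => if q.1 = t then some q.2 else none)))))) := by
  by_cases h : pairs = []
  · subst h; rfl
  · obtain ⟨q, rest, rfl⟩ := List.exists_cons_of_ne_nil h
    have hmem : q.1 ∈ PySem.List.dedup (((q :: rest).map Prod.fst)) := by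
      rw [PySem.List.mem_dedup]; simp
    have hdne := List.ne_nil_of_mem hmem
    have hsz : (((q :: rest)).foldl stepA PySem.Dict.empty).size ≠ 0 := by
      simp only [PySem.Dict.size, items_fold_stepA]
      simpa using hdne
    rw [if_neg hsz, if_neg h, items_fold_stepA]

-- ===== VERDICT (by name: the statement is the Claim_ definition above) =====
theorem build_baskets_py_spec : Claim_equal_build_baskets_py := by
  intro rows tc pc _
  unfold Spec_build_baskets_py
  simp only [build_baskets_py, build_baskets_py_alt]
  rw [foldA_eq_fold_pairs]
  exact main_fold_stepA _
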